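-- pv_equiv track=rewrite | github.com/TheRealMarVin/advent_of_code_2023 | day_2/day_02_02.py | get_minimum_set
-- ===== SOURCE A (Python) =====
-- def get_minimum_set(game_counts):
--     minimum_set = {}
--     for game in game_counts:
--         for k, v in game.items():
--             if k not in minimum_set:
--                 minimum_set[k] = v
--             else:
--                 minimum_set[k] = max(minimum_set[k], v)
--
--     return minimum_set
-- ===== SOURCE B (Python) =====
-- def get_minimum_set(game_counts):
--     # collect every key once, in first-occurrence order
--     keys = []
--     seen = set()
--     for game in game_counts:
--         for k in game:
--             if k not in seen:
--                 seen.add(k)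
--                 keys.append(k)
--     # per key, take the max over the games that contain it
--     return {k: max(v for g in game_counts for kk, v in g.items() if kk == k)
--             for k in keys}
-- ===== Notes on version B (the rewrite author's own statement) =====
-- stated objective: alternative
-- what changed: B replaces A's single streaming dict merge by a two-phase key-grouped computation: first collect the distinct keys in first-occurrence order, then build the result dict by taking, per key, the max over the values of the games that contain that key.
import Mathlib
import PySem

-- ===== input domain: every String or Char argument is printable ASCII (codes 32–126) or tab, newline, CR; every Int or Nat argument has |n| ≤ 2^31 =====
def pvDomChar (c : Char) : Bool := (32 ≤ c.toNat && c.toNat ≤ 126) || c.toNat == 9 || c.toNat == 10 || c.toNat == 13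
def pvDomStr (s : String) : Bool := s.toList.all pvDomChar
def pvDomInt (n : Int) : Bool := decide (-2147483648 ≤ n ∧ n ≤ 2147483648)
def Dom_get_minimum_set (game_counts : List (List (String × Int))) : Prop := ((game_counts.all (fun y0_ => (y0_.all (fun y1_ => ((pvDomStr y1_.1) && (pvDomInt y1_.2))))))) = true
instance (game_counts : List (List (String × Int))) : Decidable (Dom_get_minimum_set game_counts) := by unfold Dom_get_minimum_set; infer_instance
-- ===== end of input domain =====

-- B reorganises A's streaming dict merge into key collection followed by a per-key max scan (alternative decomposition, same results).


-- ===== PORT A =====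
-- loop body of A: 'if k not in minimum_set: minimum_set[k] = v else: minimum_set[k] = max(minimum_set[k], v)'
-- (the membership test is the get? match; in the 'else' branch minimum_set[k] is the matched value)
def pvStepA (d : PySem.Dict String Int) (kv : String × Int) : PySem.Dict String Int :=
  match d.get? kv.1 with
  | none => d.insert kv.1 kv.2
  | some w => d.insert kv.1 (max w kv.2)

def get_minimum_set (game_counts : List (List (String × Int))) : List (String × Int) :=
  (game_counts.foldl (fun minimum_set game => game.foldl pvStepA minimum_set) PySem.Dict.empty).items

-- ===== PORT B =====
-- '[v for g in game_counts for kk, v in g.items() if kk == k]'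
def pvVals (game_counts : List (List (String × Int))) (k : String) : List Int :=
  game_counts.flatMap (fun g => (g.filter (fun kv => kv.1 == k)).map Prod.snd)

-- B keeps the ordered list 'keys' and the set 'seen' in lockstep; a PySem.Set is exactly that
-- ordered duplicate-free list, so one Set.add fold ports both accumulators.
-- 'max(...)' is on a nonempty list for every collected key, so the .getD 0 default is unreachable.
def get_minimum_set_alt (game_counts : List (List (String × Int))) : List (String × Int) :=
  let keys : PySem.Set String :=
    game_counts.foldl (fun seen game => game.foldl (fun seen kv => PySem.Set.add seen kv.1) seen) PySem.Set.empty
  keys.map (fun k => (k, (PySem.List.max? (pvVals game_counts k) (fun v => v)).getD 0))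

-- ===== PRECONDITION & SPEC =====
def Spec_get_minimum_set (game_counts : List (List (String × Int))) (out : List (String × Int)) : Prop := out = get_minimum_set_alt game_counts
instance (game_counts : List (List (String × Int))) (out : List (String × Int)) : Decidable (Spec_get_minimum_set game_counts out) := by unfold Spec_get_minimum_set; infer_instance

-- ===== CLAIM (what is proved, stated in full; the proofs are below) =====
def Claim_equal_get_minimum_set : Prop := ∀ (game_counts : List (List (String × Int))), Dom_get_minimum_set game_counts → Spec_get_minimum_set game_counts (get_minimum_set game_counts)

-- ===== LEMMAS AND PROOFS =====

-- B's max of the collected values, as a function of the flattened pair list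
def pvMaxv (ps : List (String × Int)) (k : String) : Int :=
  (PySem.List.max? ((ps.filter (fun kv => kv.1 == k)).map Prod.snd) (fun v => v)).getD 0

lemma pvVals_eq_flatten (gcs : List (List (String × Int))) (k : String) :
    pvVals gcs k = (gcs.flatten.filter (fun kv => kv.1 == k)).map Prod.snd := by
  induction gcs with
  | nil => rfl
  | cons g t ih => simp [pvVals, List.flatMap_cons, List.filter_append, List.map_append] at *; rw [ih]

lemma max?_append_singleton (xs : List Int) (x : Int) :
    PySem.List.max? (xs ++ [x]) (fun v => v) =
      some ((PySem.List.max? xs (fun v => v)).elim x (fun m => max m x)) := by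
  cases xs with
  | nil => simp [PySem.List.max?]
  | cons y t =>
      rw [List.cons_append, PySem.List.max?_id_cons, PySem.List.max?_id_cons]
      simp [List.foldl_append]

-- the invariant: A's dict after consuming ps has items (keys of ps, deduped in order) ↦ pvMaxv ps
lemma core (ps : List (String × Int)) :
    (ps.foldl pvStepA PySem.Dict.empty).items =
      (PySem.Set.ofList (ps.map Prod.fst)).map (fun k => (k, pvMaxv ps k)) := by
  induction ps using List.reverseRecOn with
  | nil => rfl
  | append_singleton qs kv ih =>
      obtain ⟨k, v⟩ := kv
      rw [List.foldl_append, List.foldl_cons, List.foldl_nil]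
      generalize hd : qs.foldl pvStepA PySem.Dict.empty = d at ih
      have hKnd : (PySem.Set.ofList (qs.map Prod.fst)).Nodup := PySem.Set.nodup_ofList _
      have hkeys : d.keys = PySem.Set.ofList (qs.map Prod.fst) := by
        rw [PySem.Dict.keys, ih, List.map_map]
        show List.map id _ = _
        exact List.map_id _
      have hnd : d.keys.Nodup := by rw [hkeys]; exact hKnd
      have hKset : PySem.Set.ofList ((qs ++ [(k, v)]).map Prod.fst)
          = PySem.Set.add (PySem.Set.ofList (qs.map Prod.fst)) k := by
        rw [List.map_append]; exact PySem.Set.ofList_append_singleton _ _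
      have hmax_ne : ∀ k', k' ≠ k → pvMaxv (qs ++ [(k, v)]) k' = pvMaxv qs k' := by
        intro k' hne
        have : ((k : String) == k') = false := by simpa using Ne.symm hne
        simp [pvMaxv, List.filter_append, this]
      have hmem_vals : ∀ k', k' ∈ PySem.Set.ofList (qs.map Prod.fst) →
          (qs.filter (fun kv => kv.1 == k')).map Prod.snd ≠ [] := by
        intro k' hk' h
        obtain ⟨p, hp, rfl⟩ := List.mem_map.mp ((PySem.Set.mem_ofList _ _).mp hk')
        rw [List.map_eq_nil_iff, List.filter_eq_nil_iff] at h
        exact h p hp (by simp)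
      by_cases hk : k ∈ PySem.Set.ofList (qs.map Prod.fst)
      · -- key already present: in-place overwrite with the max
        have hget : d.get? k = some (pvMaxv qs k) := by
          apply PySem.Dict.get?_of_mem_items d (v := pvMaxv qs k) _ hnd
          rw [ih]; exact List.mem_map.mpr ⟨k, hk, rfl⟩
        have hcont : d.contains k = true := by
          rw [PySem.Dict.contains_eq_isSome_get?, hget]; rfl
        have hsome : ∃ m, PySem.List.max? ((qs.filter (fun kv => kv.1 == k)).map Prod.snd) (fun v => v) = some m := by
          cases hmx : PySem.List.max? ((qs.filter (fun kv => kv.1 == k)).map Prod.snd) (fun v => v) with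
          | none => exact absurd ((PySem.List.max?_eq_none_iff _ _).mp hmx) (hmem_vals k hk)
          | some m => exact ⟨m, rfl⟩
        obtain ⟨m, hm⟩ := hsome
        have hmax_eq : pvMaxv (qs ++ [(k, v)]) k = max (pvMaxv qs k) v := by
          simp only [pvMaxv, List.filter_append, List.map_append]
          simp [max?_append_singleton, hm]
        rw [pvStepA, hget]
        simp only []
        rw [PySem.Dict.items_insert_of_contains d _ hcont, ih, hKset,
            show PySem.Set.add (PySem.Set.ofList (qs.map Prod.fst)) k = PySem.Set.ofList (qs.map Prod.fst) from by
              simp [PySem.Set.add, PySem.Set.contains, hk],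
            List.map_map]
        apply List.map_congr_left
        intro a ha
        by_cases hak : a = k
        · subst hak; simp [hmax_eq]
        · have : ((a : String) == k) = false := by simpa using hak
          simp [hmax_ne a hak, hak]
      · -- fresh key: appended at the end
        have hget : d.get? k = none := by
          rw [PySem.Dict.get?_eq_none_iff_not_mem_keys, hkeys]; exact hk
        have hcont : d.contains k = false := by
          rw [PySem.Dict.contains_eq_isSome_get?, hget]; rfl
        rw [pvStepA, hget]
        simp only []
        rw [PySem.Dict.items_insert_of_not_contains d _ hcont, ih, hKset,
            show PySem.Set.add (PySem.Set.ofList (qs.map Prod.fst)) k = PySem.Set.ofList (qs.map Prod.fst) ++ [k] from by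
              simp [PySem.Set.add, PySem.Set.contains, hk],
            List.map_append]
        congr 1
        · apply List.map_congr_left
          intro a ha
          have hak : a ≠ k := fun h => hk (h ▸ ha)
          rw [hmax_ne a hak]
        · simp only [List.map_cons, List.map_nil]
          have hfil : qs.filter (fun kv => kv.1 == k) = [] := by
            rw [List.filter_eq_nil_iff]
            intro p hp hpk
            exact hk ((PySem.Set.mem_ofList _ _).mpr (List.mem_map.mpr ⟨p, hp, by simpa using hpk⟩))
          simp [pvMaxv, List.filter_append, hfil, PySem.List.max?]

lemma altKeys (gcs : List (List (String × Int))) :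
    gcs.foldl (fun seen game => game.foldl (fun seen kv => PySem.Set.add seen kv.1) seen) PySem.Set.empty
      = PySem.Set.ofList (gcs.flatten.map Prod.fst) := by
  rw [PySem.Set.ofList_eq_foldl, List.foldl_map, List.foldl_flatten]
  rfl

-- ===== VERDICT (by name: the statement is the Claim_ definition above) =====
theorem get_minimum_set_spec : Claim_equal_get_minimum_set := by
  intro gcs _
  show get_minimum_set gcs = get_minimum_set_alt gcs
  unfold get_minimum_set get_minimum_set_alt
  rw [← List.foldl_flatten, core, altKeys]
  apply List.map_congr_left
  intro k hk
  simp [pvMaxv, pvVals_eq_flatten]
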